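-- pv_equiv track=rewrite | github.com/ThenTech/BDA-Assignments | Plagiarism/Resources/submissions/submissions/2659425.py | uniek
-- ===== SOURCE A (Python) =====
-- def uniek(matrix):
--     el_list = []
--     for i in range(len(matrix)):
--         for j in range(len(matrix[i])):
--             el_list.append(matrix[i][j])
--     for i in range(len(el_list)):
--         for j in range(i + 1, len(el_list)):
--             if el_list[i] == el_list[j]:
--                 return False
--
--     return True
-- ===== SOURCE B (Python) =====
-- def uniek(matrix):
--     flat = sorted(x for row in matrix for x in row)
--     for a, b in zip(flat, flat[1:]):
--         if a == b:
--             return False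
--     return True
-- ===== Notes on version B (the rewrite author's own statement) =====
-- stated objective: alternative
-- what changed: Replaces the quadratic all-pairs equality scan with sort-then-adjacent-compare over the flattened matrix; A short-circuits early on duplicate-heavy random inputs, so no speed is claimed.
import Mathlib
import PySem

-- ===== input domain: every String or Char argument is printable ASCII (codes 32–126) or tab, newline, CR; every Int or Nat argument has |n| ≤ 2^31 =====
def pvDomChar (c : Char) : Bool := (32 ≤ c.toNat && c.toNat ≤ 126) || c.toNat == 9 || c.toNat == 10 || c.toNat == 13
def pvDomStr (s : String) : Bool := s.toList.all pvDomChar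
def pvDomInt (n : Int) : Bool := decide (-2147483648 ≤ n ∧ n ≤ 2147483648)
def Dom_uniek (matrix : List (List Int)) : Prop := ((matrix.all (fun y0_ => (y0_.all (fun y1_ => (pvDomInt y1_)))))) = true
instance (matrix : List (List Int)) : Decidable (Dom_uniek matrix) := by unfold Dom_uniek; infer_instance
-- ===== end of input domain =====

-- B replaces A's all-pairs equality scan with sort-then-adjacent-compare over the flattened matrix (a different algorithm; no speed claimed).


-- ===== PORT A =====
-- the second nested loop: compare el_list[i] with every later element, return False on a match
def uniekCheck : List Int → Bool
  | [] => true
  | x :: xs => if xs.any (fun y => x == y) then false else uniekCheck xs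

def uniek (matrix : List (List Int)) : Bool :=
  uniekCheck (matrix.foldl (fun acc row => row.foldl (fun a x => a ++ [x]) acc) [])

-- ===== PORT B =====
-- one pass over the sorted list, comparing each element with its predecessor
def uniekAdj : List Int → Bool
  | [] => true
  | [_] => true
  | a :: b :: t => if a == b then false else uniekAdj (b :: t)

def uniek_alt (matrix : List (List Int)) : Bool :=
  uniekAdj (PySem.List.sorted (matrix.flatMap id) (fun x => x) false)

-- ===== PRECONDITION & SPEC =====
def Spec_uniek (matrix : List (List Int)) (out : Bool) : Prop := out = uniek_alt matrix
instance (matrix : List (List Int)) (out : Bool) : Decidable (Spec_uniek matrix out) := by unfold Spec_uniek; infer_instance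

-- ===== CLAIM (what is proved, stated in full; the proofs are below) =====
def Claim_equal_uniek : Prop := ∀ (matrix : List (List Int)), Dom_uniek matrix → Spec_uniek matrix (uniek matrix)

-- ===== LEMMAS AND PROOFS =====

theorem uniekCheck_eq_nodup (l : List Int) : uniekCheck l = true ↔ l.Nodup := by
  induction l with
  | nil => simp [uniekCheck]
  | cons x xs ih =>
    by_cases h : x ∈ xs
    · have : xs.any (fun y => x == y) = true := List.any_eq_true.mpr ⟨x, h, by simp⟩
      simp [uniekCheck, this, List.nodup_cons, h]
    · have : xs.any (fun y => x == y) = false := by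
        simp only [List.any_eq_false]
        intro y hy; simp only [beq_iff_eq]; intro hxy; exact h (hxy ▸ hy)
      simp [uniekCheck, this, List.nodup_cons, h, ih]

theorem inner_fold (row acc : List Int) :
    row.foldl (fun a x => a ++ [x]) acc = acc ++ row := by
  induction row generalizing acc with
  | nil => simp
  | cons x t ih => simp [List.foldl, ih]

theorem outer_fold (m : List (List Int)) (acc : List Int) :
    m.foldl (fun acc row => row.foldl (fun a x => a ++ [x]) acc) acc = acc ++ m.flatMap id := by
  induction m generalizing acc with
  | nil => simp
  | cons r t ih => rw [List.foldl_cons, inner_fold, ih, List.flatMap_cons, List.append_assoc]; simp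

theorem uniekAdj_eq_nodup (l : List Int) (h : l.Pairwise (· ≤ ·)) :
    uniekAdj l = true ↔ l.Nodup := by
  induction l with
  | nil => simp [uniekAdj]
  | cons a t ih =>
    cases t with
    | nil => simp [uniekAdj]
    | cons b t2 =>
      have h' : (b :: t2).Pairwise (· ≤ ·) := h.tail
      by_cases hab : a = b
      · subst hab
        simp [uniekAdj, List.nodup_cons]
      · have hle : a ≤ b := (List.pairwise_cons.mp h).1 b (by simp)
        have halt : a ∉ b :: t2 := by
          intro hmem
          rcases List.mem_cons.mp hmem with hm | hm
          · exact hab hm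
          · exact hab (le_antisymm hle ((List.pairwise_cons.mp h').1 a hm))
        simp [uniekAdj, hab, List.nodup_cons, halt, ih h']

theorem uniek_eq_alt (matrix : List (List Int)) : uniek matrix = uniek_alt matrix := by
  have hperm : (PySem.List.sorted (matrix.flatMap id) (fun x => x) false).Perm (matrix.flatMap id) :=
    PySem.List.sorted_perm _ _ _
  have hpw : (PySem.List.sorted (matrix.flatMap id) (fun x => x) false).Pairwise (· ≤ ·) := by
    simpa using PySem.List.sorted_pairwise (matrix.flatMap id) (fun x => x)
  have h1 : uniek matrix = true ↔ (matrix.flatMap id).Nodup := by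
    rw [uniek, outer_fold]; simpa using uniekCheck_eq_nodup (matrix.flatMap id)
  have h2 : uniek_alt matrix = true ↔ (matrix.flatMap id).Nodup := by
    rw [uniek_alt, uniekAdj_eq_nodup _ hpw]; exact hperm.nodup_iff
  rcases Bool.eq_false_or_eq_true (uniek_alt matrix) with hb | hb
  · exact hb ▸ h1.mpr (h2.mp hb)
  · -- uniek_alt matrix = false: uniek cannot be true either
    rcases Bool.eq_false_or_eq_true (uniek matrix) with ha | ha
    · exact absurd (h2.mpr (h1.mp ha)) (by simp [hb])
    · rw [ha, hb]

-- ===== VERDICT (by name: the statement is the Claim_ definition above) =====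
theorem uniek_spec : Claim_equal_uniek := by
  intro matrix _
  exact uniek_eq_alt matrix
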